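-- pv_equiv track=rewrite | github.com/jdinalt/forgather | src/forgather/ml/trainer/pipeline/pipeline_trainer.py | pipeline_stage_indices
-- ===== SOURCE A (Python) =====
-- from typing import Callable, Any, Dict, List, Tuple, Optional, Union, Iterable
--
-- def pipeline_stage_indices(pp_size, n_stages, style: str = "loop") -> List[Tuple[int]]:
--     """
--     Get the stage indices for all ranks
--
--     See: https://github.com/pytorch/torchtitan/blob/main/torchtitan/distributed/pipeline.py#L194
--     """
--     stages_per_rank = n_stages // pp_size
--     match style:
--         case "loop":
--             assert (
--                 n_stages % pp_size == 0
--             ), f"n_stages {n_stages} must be divisible by pipeline size {pp_size}"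
--
--             stage_indices = list(
--                 tuple(rank + i * pp_size for i in range(stages_per_rank))
--                 for rank in range(pp_size)
--             )
--         case "v":
--             # Sanity check that all of the computed indices are valid
--             assert stages_per_rank == 2
--
--             stage_indices = list(
--                 tuple(
--                     x for x in zip(range(pp_size), range(n_stages - 1, pp_size - 1, -1))
--                 )
--             )
--
--         case _:
--             raise Exception(f"Unrecognized indices styel {style}")
--
--     return stage_indices
-- ===== SOURCE B (Python) =====
-- def pipeline_stage_indices(pp_size, n_stages, style: str = "loop"):
--     stages_per_rank = n_stages // pp_size
--     match style:
--         case "loop":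
--             assert (
--                 n_stages % pp_size == 0
--             ), f"n_stages {n_stages} must be divisible by pipeline size {pp_size}"
--             buckets = [[] for _ in range(pp_size)]
--             for s in range(n_stages):
--                 buckets[s % pp_size].append(s)
--             stage_indices = [tuple(b) for b in buckets]
--         case "v":
--             assert stages_per_rank == 2
--             stage_indices = [(r, n_stages - 1 - r) for r in range(pp_size)]
--         case _:
--             raise Exception(f"Unrecognized indices styel {style}")
--     return stage_indices
-- ===== Notes on version B (the rewrite author's own statement) =====
-- stated objective: alternative
-- what changed: The 'loop' branch scatters all stages round-robin into per-rank list buckets in a single pass over range(n_stages) instead of gathering each rank's stages with the nested rank+i*pp_size comprehension, and the 'v' branch builds the pairs directly as (r, n_stages-1-r) over range(pp_size) instead of zipping two ranges; Pre_ excludes the degenerate loop-branch inputs with negative pp_size and positive n_stages, where A vacuously returns [] through an empty rank range while B's bucket indexing raises IndexError.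
-- outside the precondition, e.g. on pipeline_stage_indices(-2, 4, 'loop'): A returns [], B raises IndexError
import Mathlib
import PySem

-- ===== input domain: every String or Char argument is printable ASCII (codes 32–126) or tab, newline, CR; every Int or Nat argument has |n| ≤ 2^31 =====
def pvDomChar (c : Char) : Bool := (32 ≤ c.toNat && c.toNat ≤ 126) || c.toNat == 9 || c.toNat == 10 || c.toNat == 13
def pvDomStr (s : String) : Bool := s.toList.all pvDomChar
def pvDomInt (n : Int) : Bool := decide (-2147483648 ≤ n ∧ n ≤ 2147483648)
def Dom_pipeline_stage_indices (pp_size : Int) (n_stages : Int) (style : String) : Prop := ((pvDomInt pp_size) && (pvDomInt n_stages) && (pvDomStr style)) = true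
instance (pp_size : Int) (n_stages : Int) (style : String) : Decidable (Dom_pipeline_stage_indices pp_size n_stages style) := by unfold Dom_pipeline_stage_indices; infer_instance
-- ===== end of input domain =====

-- B: the 'loop' branch scatters stages round-robin into per-rank buckets in one pass instead of
-- the nested arithmetic comprehension; the 'v' branch builds the pairs directly instead of zipping two ranges.


-- ===== PORT A =====
-- literal transliteration of A; the asserts / the Exception branch raise in Python and are excluded by Pre_
def pipeline_stage_indices (pp_size : Int) (n_stages : Int) (style : String) : List (List Int) :=
  let stages_per_rank := PySem.Int.floordiv n_stages pp_size
  if style = "loop" then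
    (PySem.List.pyRange 0 pp_size 1).map (fun rank =>
      (PySem.List.pyRange 0 stages_per_rank 1).map (fun i => rank + i * pp_size))
  else if style = "v" then
    ((PySem.List.pyRange 0 pp_size 1).zip
      (PySem.List.pyRange (n_stages - 1) (pp_size - 1) (-1))).map (fun x => [x.1, x.2])
  else []  -- raise Exception: outside Pre_

-- ===== PORT B =====
def pipeline_stage_indices_alt (pp_size : Int) (n_stages : Int) (style : String) : List (List Int) :=
  if style = "loop" then
    -- buckets = [[] for _ in range(pp_size)]; buckets[s % pp_size].append(s)
    -- (under Pre_ the index s % pp_size is a nonnegative in-range index, so List.modify at .toNat is exact)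
    let buckets := (PySem.List.pyRange 0 pp_size 1).map (fun _ => ([] : List Int))
    let buckets := (PySem.List.pyRange 0 n_stages 1).foldl
      (fun b s => b.modify (PySem.Int.mod s pp_size).toNat (· ++ [s])) buckets
    buckets  -- [tuple(b) for b in buckets]: a tuple is the same List Int under the type convention
  else if style = "v" then
    (PySem.List.pyRange 0 pp_size 1).map (fun r => [r, n_stages - 1 - r])
  else []  -- raise Exception: outside Pre_

-- ===== PRECONDITION & SPEC =====
-- Pre_ excludes the inputs where A raises (unknown style, failed assert, pp_size = 0) and, in the
-- 'loop' branch, the degenerate inputs with negative pp_size and positive n_stages, where A returns []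
-- vacuously through an empty rank range while B's bucket indexing raises an IndexError.
def Pre_pipeline_stage_indices (pp_size : Int) (n_stages : Int) (style : String) : Prop :=
  (style = "loop" ∧ pp_size ≠ 0 ∧ PySem.Int.mod n_stages pp_size = 0 ∧ (0 < pp_size ∨ n_stages ≤ 0)) ∨
  (style = "v" ∧ pp_size ≠ 0 ∧ PySem.Int.floordiv n_stages pp_size = 2)
instance (pp_size : Int) (n_stages : Int) (style : String) : Decidable (Pre_pipeline_stage_indices pp_size n_stages style) := by unfold Pre_pipeline_stage_indices; infer_instance

def pvWitness_pipeline_stage_indices : Int × Int × String := (2, 6, "loop")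

def Spec_pipeline_stage_indices (pp_size : Int) (n_stages : Int) (style : String) (out : List (List Int)) : Prop := out = pipeline_stage_indices_alt pp_size n_stages style
instance (pp_size : Int) (n_stages : Int) (style : String) (out : List (List Int)) : Decidable (Spec_pipeline_stage_indices pp_size n_stages style out) := by unfold Spec_pipeline_stage_indices; infer_instance

-- ===== CLAIM (what is proved, stated in full; the proofs are below) =====
def Claim_equal_pipeline_stage_indices : Prop := ∀ (pp_size : Int) (n_stages : Int) (style : String), Dom_pipeline_stage_indices pp_size n_stages style → Pre_pipeline_stage_indices pp_size n_stages style → Spec_pipeline_stage_indices pp_size n_stages style (pipeline_stage_indices pp_size n_stages style)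

-- ===== LEMMAS AND PROOFS =====

-- the bucket-scatter fold, read back at position r, appends exactly the residue-class filter
lemma foldl_modify_getElem? (pp : Int) (xs : List Int) (bs : List (List Int)) (r : Nat) :
    (xs.foldl (fun b s => b.modify (PySem.Int.mod s pp).toNat (· ++ [s])) bs)[r]? =
    bs[r]?.map (fun l => l ++ xs.filter (fun s => (PySem.Int.mod s pp).toNat == r)) := by
  induction xs generalizing bs with
  | nil => simp
  | cons s xs ih =>
    rw [List.foldl_cons, ih, List.getElem?_modify, List.filter_cons]
    cases h : bs[r]? with
    | none => simp
    | some l =>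
      by_cases hir : (PySem.Int.mod s pp).toNat = r
      · simp [hir]
      · have : ¬ ((PySem.Int.mod s pp).toNat == r) = true := by simpa using hir
        simp [hir, this]

-- one full period of the range filters to the single stage a + r
lemma filter_segment (pp a r : Int) (hpp : 0 < pp) (hr0 : 0 ≤ r) (hr : r < pp) (ha : pp ∣ a) :
    (PySem.List.pyRange a (a + pp) 1).filter (fun s => PySem.Int.mod s pp == r) = [a + r] := by
  rw [PySem.List.pyRange_one, List.filter_map]
  have hc : ∀ j ∈ List.range (a + pp - a).toNat,
      (((fun s => PySem.Int.mod s pp == r) ∘ fun k : Nat => a + (k : Int)) j) = (j == r.toNat) := by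
    intro j hj
    simp only [List.mem_range] at hj
    have hj' : (j : Int) < pp := by omega
    have hm : PySem.Int.mod (a + (j : Int)) pp = (j : Int) := by
      rw [PySem.Int.mod_eq_emod_of_pos hpp]
      rcases ha with ⟨c, hc⟩
      subst hc
      rw [mul_comm, Int.mul_add_emod_self_right]
      exact Int.emod_eq_of_lt (by omega) hj'
    show (PySem.Int.mod (a + (j : Int)) pp == r) = (j == r.toNat)
    rw [hm]
    have : ((j : Int) = r) ↔ (j = r.toNat) := by omega
    simp [this]
  rw [List.filter_congr hc, List.filter_beq, List.count_range]
  have h2 : r.toNat < (a + pp - a).toNat := by omega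
  rw [if_pos h2]
  simp
  omega

-- the residue-class filter of range(k*pp) is rank r's arithmetic progression
lemma filter_eq_progression (pp r : Int) (k : Nat) (hpp : 0 < pp) (hr0 : 0 ≤ r) (hr : r < pp) :
    (PySem.List.pyRange 0 ((k : Int) * pp) 1).filter (fun s => PySem.Int.mod s pp == r) =
    (PySem.List.pyRange 0 (k : Int) 1).map (fun i => r + i * pp) := by
  induction k with
  | zero => simp [PySem.List.pyRange_one_eq_nil]
  | succ k ih =>
    have h1 : ((k + 1 : Nat) : Int) * pp = (k : Int) * pp + pp := by push_cast; ring
    have h0 : (0 : Int) ≤ (k : Int) * pp := by positivity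
    rw [h1, PySem.List.pyRange_one_append 0 ((k : Int) * pp) _ h0 (by omega),
        List.filter_append, ih,
        filter_segment pp ((k : Int) * pp) r hpp hr0 hr ⟨k, mul_comm _ _⟩]
    rw [show ((k + 1 : Nat) : Int) = (k : Int) + 1 by push_cast; ring,
        PySem.List.pyRange_one_succ_right (by positivity), List.map_append]
    simp [mul_comm]
    ring

-- the residue-class filter of range(n) is rank r's progression, for any n with n % pp == 0
lemma filter_eq_progression' (pp n r : Int) (hpp : 0 < pp) (hr0 : 0 ≤ r) (hr : r < pp)
    (hmod : PySem.Int.mod n pp = 0) :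
    (PySem.List.pyRange 0 n 1).filter (fun s => PySem.Int.mod s pp == r) =
    (PySem.List.pyRange 0 (PySem.Int.floordiv n pp) 1).map (fun i => r + i * pp) := by
  rcases (PySem.Int.mod_eq_zero_iff_dvd n pp).mp hmod with ⟨c, hc⟩
  by_cases hc0 : 0 ≤ c
  · have hspr : PySem.Int.floordiv n pp = c := by
      rw [PySem.Int.floordiv_eq_iff_of_pos hpp]
      constructor <;> nlinarith
    obtain ⟨k, hk⟩ : ∃ k : Nat, c = (k : Int) := ⟨c.toNat, (Int.toNat_of_nonneg hc0).symm⟩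
    rw [hspr, hc, hk, mul_comm pp _]
    exact filter_eq_progression pp r k hpp hr0 hr
  · have hn : n < 0 := by nlinarith
    have hspr : PySem.Int.floordiv n pp ≤ 0 := by
      have h1 := PySem.Int.floordiv_mul_add_mod n pp
      have h2 := PySem.Int.mod_nonneg n hpp
      nlinarith
    rw [PySem.List.pyRange_one_eq_nil (by omega : n ≤ 0),
        PySem.List.pyRange_one_eq_nil hspr]
    simp

-- the Nat-index filter predicate agrees with the Int one for in-range r
lemma filter_toNat_eq (pp n : Int) (r : Nat) (hpp : 0 < pp) :
    (PySem.List.pyRange 0 n 1).filter (fun s => (PySem.Int.mod s pp).toNat == r) =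
    (PySem.List.pyRange 0 n 1).filter (fun s => PySem.Int.mod s pp == (r : Int)) := by
  apply List.filter_congr
  intro s _
  have h0 := PySem.Int.mod_nonneg s hpp
  have : ((PySem.Int.mod s pp).toNat = r) ↔ (PySem.Int.mod s pp = (r : Int)) := by omega
  simp [this]

-- the v branch's zip equals B's direct formula under the branch's assert
lemma zip_eq_pairs (pp n : Int) (hdiv : PySem.Int.floordiv n pp = 2) :
    ((PySem.List.pyRange 0 pp 1).zip (PySem.List.pyRange (n - 1) (pp - 1) (-1))).map
      (fun x => ([x.1, x.2] : List Int)) =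
    (PySem.List.pyRange 0 pp 1).map (fun r => [r, n - 1 - r]) := by
  by_cases hpos : 0 < pp
  · have hb := (PySem.Int.floordiv_eq_iff_of_pos hpos).mp hdiv
    rw [PySem.List.pyRange_one, PySem.List.pyRange_neg_one]
    apply List.ext_getElem
    · simp; omega
    · intro i h1 h2
      simp only [List.getElem_map, List.getElem_zip, List.getElem_range]
      simp only [List.length_map, List.length_zip, List.length_range] at h1 h2
      show [0 + (i : Int), n - 1 - (i : Int)] = [0 + (i : Int), n - 1 - (0 + (i : Int))]
      rw [zero_add]
  · rw [PySem.List.pyRange_one_eq_nil (by omega : pp ≤ 0)]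
    simp

-- ===== VERDICT (by name: the statement is the Claim_ definition above) =====
theorem pipeline_stage_indices_spec : Claim_equal_pipeline_stage_indices := by
  intro pp n style _ hpre
  unfold Spec_pipeline_stage_indices pipeline_stage_indices pipeline_stage_indices_alt
  rcases hpre with ⟨hs, hpp, hmod, hsign⟩ | ⟨hs, hpp, hdiv⟩
  · subst hs; rw [if_pos rfl, if_pos rfl]
    by_cases hpos : 0 < pp
    · apply List.ext_getElem?
      intro r
      rw [foldl_modify_getElem?, List.getElem?_map, List.getElem?_map,
          PySem.List.getElem?_pyRange_one]
      by_cases hr : r < (pp - 0).toNat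
      · rw [if_pos hr]
        simp only [Option.map_some, List.nil_append, zero_add]
        rw [filter_toNat_eq pp n r hpos,
            filter_eq_progression' pp n r hpos (by omega) (by omega) hmod]
      · rw [if_neg hr]; simp
    · -- pp_size < 0 (so n_stages ≤ 0 by Pre_): both sides are []
      have hn : n ≤ 0 := by rcases hsign with h | h <;> omega
      rw [PySem.List.pyRange_one_eq_nil (by omega : pp ≤ 0),
          PySem.List.pyRange_one_eq_nil hn]
      simp
  · subst hs
    rw [if_neg (by decide), if_pos rfl, if_neg (by decide), if_pos rfl]
    exact zip_eq_pairs pp n hdiv
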